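-- pv_equiv track=rewrite | github.com/henrysouchien/finance-cli | finance_cli/commands/biz_cmd.py | _year_param
-- ===== SOURCE A (Python) =====
-- from typing import Any
--
-- def _year_param(params: dict[int, Any], tax_year: int) -> Any:
--     if tax_year in params:
--         return params[tax_year]
--     if not params:
--         raise ValueError("Missing tax parameters")
--     years = sorted(params.keys())
--     candidates = [year for year in years if year <= tax_year]
--     if candidates:
--         return params[candidates[-1]]
--     return params[years[0]]
-- ===== SOURCE B (Python) =====
-- from typing import Any
--
-- def _year_param(params: dict[int, Any], tax_year: int) -> Any:
--     if not params:
--         raise ValueError("Missing tax parameters")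
--     best_le = None      # (year, value) with the largest year <= tax_year seen so far
--     global_min = None   # (year, value) with the smallest year seen so far
--     for year, value in params.items():
--         if year <= tax_year and (best_le is None or year > best_le[0]):
--             best_le = (year, value)
--         if global_min is None or year < global_min[0]:
--             global_min = (year, value)
--     return best_le[1] if best_le is not None else global_min[1]
-- ===== Notes on version B (the rewrite author's own statement) =====
-- stated objective: simpler
-- what changed: Replaces the sort + candidate-list comprehension + membership shortcut with a single linear pass that keeps a running maximum key <= tax_year and a running minimum key; the fallback and exact-hit cases are absorbed by the running maximum.
import Mathlib
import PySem

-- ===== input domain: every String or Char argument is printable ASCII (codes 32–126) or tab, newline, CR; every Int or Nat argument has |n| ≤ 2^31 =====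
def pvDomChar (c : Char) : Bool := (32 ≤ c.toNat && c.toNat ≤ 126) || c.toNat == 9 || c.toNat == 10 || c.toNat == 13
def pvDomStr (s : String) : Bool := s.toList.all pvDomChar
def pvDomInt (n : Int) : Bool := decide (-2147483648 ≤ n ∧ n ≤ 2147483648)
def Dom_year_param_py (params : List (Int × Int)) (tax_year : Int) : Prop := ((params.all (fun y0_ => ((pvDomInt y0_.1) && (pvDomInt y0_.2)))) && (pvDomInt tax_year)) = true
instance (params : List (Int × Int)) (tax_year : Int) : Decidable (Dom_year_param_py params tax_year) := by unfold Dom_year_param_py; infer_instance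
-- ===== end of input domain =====

-- B replaces A's sort + candidate comprehension + membership shortcut by one linear pass
-- keeping a running maximum key ≤ tax_year and a running minimum key (objective: simpler, no sort).

-- ===== PORT A =====
-- Literal port of A. Python raises ValueError on an empty dict (excluded by Pre_);
-- the port returns 0 on that path. `params[k]` on the two hit paths is ported as getD
-- with default 0: on both paths the key is provably present, so KeyError is impossible.
def year_param_py (params : List (Int × Int)) (tax_year : Int) : Int :=
  let d := PySem.Dict.mk params
  if d.contains tax_year then d.getD tax_year 0
  else
    -- `if not params: raise ValueError` — excluded by Pre_; falls through to the 0 below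
    let years := PySem.List.sorted d.keys (fun y => y)
    let candidates := years.filter (fun y => decide (y ≤ tax_year))
    match candidates.getLast? with          -- `if candidates: return params[candidates[-1]]`
    | some c => d.getD c 0
    | none =>
      match years.head? with                -- `return params[years[0]]`
      | some m => d.getD m 0
      | none => 0                           -- only reachable when params = [] (A raises)

-- ===== PORT B =====
-- `if year <= tax_year and (best_le is None or year > best_le[0]): best_le = (year, value)`
def pvStepBL (tax_year : Int) (o : Option (Int × Int)) (kv : Int × Int) : Option (Int × Int) :=
  if kv.1 ≤ tax_year && (match o with | none => true | some p => decide (p.1 < kv.1)) then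
    some kv
  else o

-- `if global_min is None or year < global_min[0]: global_min = (year, value)`
def pvStepGM (o : Option (Int × Int)) (kv : Int × Int) : Option (Int × Int) :=
  match o with
  | none => some kv
  | some p => if kv.1 < p.1 then some kv else o

def year_param_py_alt (params : List (Int × Int)) (tax_year : Int) : Int :=
  if params = [] then 0   -- `raise ValueError` in B (excluded by Pre_)
  else
    let r := params.foldl (fun acc kv => (pvStepBL tax_year acc.1 kv, pvStepGM acc.2 kv))
      (none, none)
    match r.1 with
    | some p => p.2
    | none => match r.2 with | some p => p.2 | none => 0   -- unreachable: params ≠ []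

-- ===== PRECONDITION & SPEC =====
-- Pre_ excludes exactly the empty dict, on which both Pythons raise ValueError.
def Pre_year_param_py (params : List (Int × Int)) (tax_year : Int) : Prop := params ≠ []
instance (params : List (Int × Int)) (tax_year : Int) : Decidable (Pre_year_param_py params tax_year) := by unfold Pre_year_param_py; infer_instance
def pvWitness_year_param_py : (List (Int × Int)) × Int := ([(2020, 5), (2023, 7)], 2022)

def Spec_year_param_py (params : List (Int × Int)) (tax_year : Int) (out : Int) : Prop := out = year_param_py_alt params tax_year
instance (params : List (Int × Int)) (tax_year : Int) (out : Int) : Decidable (Spec_year_param_py params tax_year out) := by unfold Spec_year_param_py; infer_instance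

-- ===== CLAIM (what is proved, stated in full; the proofs are below) =====
def Claim_equal_year_param_py : Prop := ∀ (params : List (Int × Int)) (tax_year : Int), Dom_year_param_py params tax_year → Pre_year_param_py params tax_year → Spec_year_param_py params tax_year (year_param_py params tax_year)

-- ===== LEMMAS AND PROOFS =====

-- First-match lookup in `s ++ t` agrees with a successful lookup in `s`.
theorem pvGetMkAppend {κ ν : Type} [BEq κ] (s t : List (κ × ν)) (k : κ) (v : ν)
    (h : (PySem.Dict.mk s).get? k = some v) :
    (PySem.Dict.mk (s ++ t)).get? k = some v := by
  induction s with
  | nil => simp [PySem.Dict.get?] at h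
  | cons a s ih =>
    rw [PySem.Dict.get?_mk_cons] at h
    rw [List.cons_append, PySem.Dict.get?_mk_cons]
    split at h
    · rename_i hb; rw [if_pos hb]; exact h
    · rename_i hb; rw [if_neg hb]; exact ih h

-- Lookup of a key absent from `s` continues into `t`.
theorem pvGetMkAppendRight {κ ν : Type} [BEq κ] [LawfulBEq κ] (s t : List (κ × ν)) (k : κ)
    (h : ∀ q ∈ s, q.1 ≠ k) :
    (PySem.Dict.mk (s ++ t)).get? k = (PySem.Dict.mk t).get? k := by
  induction s with
  | nil => simp
  | cons a s ih =>
    rw [List.cons_append, PySem.Dict.get?_mk_cons]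
    have ha : a.1 ≠ k := h a (by simp)
    simp only [beq_iff_eq, ha, if_false]
    exact ih (fun q hq => h q (by simp [hq]))

theorem pvGetMkSome_mem {κ ν : Type} [BEq κ] [LawfulBEq κ] (s : List (κ × ν)) (k : κ) (v : ν)
    (h : (PySem.Dict.mk s).get? k = some v) : k ∈ s.map (·.1) := by
  by_contra hk
  rw [show s.map (·.1) = (PySem.Dict.mk s).keys from (PySem.Dict.keys_mk s).symm] at hk
  rw [(PySem.Dict.get?_eq_none_iff_not_mem_keys _ _).2 hk] at h
  simp at h

-- invariant of B's running maximum: the held pair has key ≤ tax_year, is the first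
-- match for its key among the pairs seen, and its key dominates every seen key ≤ tax_year
def InvBL (tax_year : Int) (seen : List (Int × Int)) (o : Option (Int × Int)) : Prop :=
  match o with
  | none => ∀ q ∈ seen, ¬ q.1 ≤ tax_year
  | some p => p.1 ≤ tax_year ∧ (PySem.Dict.mk seen).get? p.1 = some p.2 ∧
      ∀ q ∈ seen, q.1 ≤ tax_year → q.1 ≤ p.1

-- invariant of B's running minimum
def InvGM (seen : List (Int × Int)) (o : Option (Int × Int)) : Prop :=
  match o with
  | none => seen = []
  | some p => (PySem.Dict.mk seen).get? p.1 = some p.2 ∧ ∀ q ∈ seen, p.1 ≤ q.1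

theorem pvStepBL_inv (tax_year : Int) (seen : List (Int × Int)) (o : Option (Int × Int))
    (x : Int × Int) (h : InvBL tax_year seen o) :
    InvBL tax_year (seen ++ [x]) (pvStepBL tax_year o x) := by
  cases o with
  | none =>
    simp only [InvBL] at h
    by_cases hx : x.1 ≤ tax_year
    · have : pvStepBL tax_year none x = some x := by simp [pvStepBL, hx]
      rw [this]
      refine ⟨hx, ?_, ?_⟩
      · rw [pvGetMkAppendRight seen [x] x.1 (fun q hq => by
          intro he; exact h q hq (he ▸ hx))]
        simp [PySem.Dict.get?]
      · intro q hq _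
        rcases List.mem_append.1 hq with hq | hq
        · exact absurd ‹q.1 ≤ tax_year› (h q hq)
        · simp at hq; subst hq; exact le_refl _
    · have : pvStepBL tax_year none x = none := by simp [pvStepBL, hx]
      rw [this]
      intro q hq
      rcases List.mem_append.1 hq with hq | hq
      · exact h q hq
      · simp at hq; subst hq; exact hx
  | some p =>
    obtain ⟨hp, hget, hmax⟩ := h
    by_cases hc : x.1 ≤ tax_year ∧ p.1 < x.1
    · have : pvStepBL tax_year (some p) x = some x := by
        simp [pvStepBL, hc.1, hc.2]
      rw [this]
      refine ⟨hc.1, ?_, ?_⟩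
      · rw [pvGetMkAppendRight seen [x] x.1 (fun q hq he => ?_)]
        · simp [PySem.Dict.get?]
        · have := hmax q hq (he ▸ hc.1)
          omega
      · intro q hq hqle
        rcases List.mem_append.1 hq with hq | hq
        · have := hmax q hq hqle; omega
        · simp at hq; subst hq; exact le_refl _
    · have : pvStepBL tax_year (some p) x = some p := by
        rcases Classical.em (x.1 ≤ tax_year) with h1 | h1
        · have h2 : ¬ p.1 < x.1 := fun h2 => hc ⟨h1, h2⟩
          simp [pvStepBL, h1, h2]
        · simp [pvStepBL, h1]
      rw [this]
      refine ⟨hp, pvGetMkAppend seen [x] p.1 p.2 hget, ?_⟩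
      intro q hq hqle
      rcases List.mem_append.1 hq with hq | hq
      · exact hmax q hq hqle
      · simp at hq; subst hq
        by_contra hlt
        exact hc ⟨hqle, by omega⟩

theorem pvStepGM_inv (seen : List (Int × Int)) (o : Option (Int × Int)) (x : Int × Int)
    (h : InvGM seen o) : InvGM (seen ++ [x]) (pvStepGM o x) := by
  cases o with
  | none =>
    simp only [InvGM] at h
    subst h
    simp only [pvStepGM, InvGM, List.nil_append]
    constructor
    · simp [PySem.Dict.get?]
    · intro q hq; simp at hq; subst hq; exact le_refl _
  | some p =>
    obtain ⟨hget, hmin⟩ := h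
    by_cases hc : x.1 < p.1
    · simp only [pvStepGM, hc, if_true]
      refine ⟨?_, ?_⟩
      · rw [pvGetMkAppendRight seen [x] x.1 (fun q hq he => ?_)]
        · simp [PySem.Dict.get?]
        · have := hmin q hq; omega
      · intro q hq
        rcases List.mem_append.1 hq with hq | hq
        · have := hmin q hq; omega
        · simp at hq; subst hq; exact le_refl _
    · simp only [pvStepGM, hc, if_false]
      refine ⟨pvGetMkAppend seen [x] p.1 p.2 hget, ?_⟩
      intro q hq
      rcases List.mem_append.1 hq with hq | hq
      · exact hmin q hq
      · simp at hq; subst hq; omega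

theorem pvFoldBL_inv (tax_year : Int) (l : List (Int × Int)) :
    ∀ (seen : List (Int × Int)) (o : Option (Int × Int)), InvBL tax_year seen o →
      InvBL tax_year (seen ++ l) (l.foldl (pvStepBL tax_year) o) := by
  induction l with
  | nil => intro seen o h; simpa using h
  | cons x l ih =>
    intro seen o h
    have := ih (seen ++ [x]) (pvStepBL tax_year o x) (pvStepBL_inv tax_year seen o x h)
    simpa [List.append_assoc] using this

theorem pvFoldGM_inv (l : List (Int × Int)) :
    ∀ (seen : List (Int × Int)) (o : Option (Int × Int)), InvGM seen o →
      InvGM (seen ++ l) (l.foldl pvStepGM o) := by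
  induction l with
  | nil => intro seen o h; simpa using h
  | cons x l ih =>
    intro seen o h
    have := ih (seen ++ [x]) (pvStepGM o x) (pvStepGM_inv seen o x h)
    simpa [List.append_assoc] using this

-- last element of a ≤-pairwise list bounds every element
theorem pvPairwiseGetLast (l : List Int) (c : Int) (hp : l.Pairwise (· ≤ ·))
    (hl : l.getLast? = some c) : ∀ x ∈ l, x ≤ c := by
  induction l with
  | nil => simp at hl
  | cons a t ih =>
    intro x hx
    cases t with
    | nil => simp at hl hx; omega
    | cons b t' =>
      rw [List.getLast?_cons_cons] at hl
      rcases List.mem_cons.1 hx with rfl | hx'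
      · exact List.rel_of_pairwise_cons hp (List.mem_of_getLast? hl)
      · exact ih hp.of_cons hl x hx'


-- head of a ≤-pairwise list is bounded by every element
theorem pvPairwiseHead (l : List Int) (m : Int) (hp : l.Pairwise (· ≤ ·))
    (hl : l.head? = some m) : ∀ x ∈ l, m ≤ x := by
  cases l with
  | nil => simp at hl
  | cons a t =>
    simp at hl; subst hl
    intro x hx
    rcases List.mem_cons.1 hx with rfl | hx'
    · exact le_refl _
    · exact List.rel_of_pairwise_cons hp hx'


theorem year_param_py_spec : Claim_equal_year_param_py := by
  intro params tax_year _ hpre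
  unfold Spec_year_param_py
  have hne : params ≠ [] := hpre
  -- B's fold result, characterized by the invariants
  have hprod : params.foldl
      (fun acc kv => (pvStepBL tax_year acc.1 kv, pvStepGM acc.2 kv))
      ((none, none) : Option (Int × Int) × Option (Int × Int)) =
      (params.foldl (pvStepBL tax_year) none, params.foldl pvStepGM none) :=
    PySem.List.foldl_prod_mk _ _ params none none
  have hbl : InvBL tax_year params (params.foldl (pvStepBL tax_year) none) := by
    have := pvFoldBL_inv tax_year params [] none (by intro q hq; simp at hq)
    simpa using this
  have hgm : InvGM params (params.foldl pvStepGM none) := by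
    have := pvFoldGM_inv params [] none (by simp [InvGM])
    simpa using this
  -- names for A's intermediate values
  set d := PySem.Dict.mk params with hd
  have hkeys : d.keys = params.map (·.1) := PySem.Dict.keys_mk params
  set years := PySem.List.sorted d.keys (fun y => y) with hyears
  have hyperm : years.Perm d.keys := PySem.List.sorted_perm _ _ _
  have hypw : years.Pairwise (· ≤ ·) := PySem.List.sorted_pairwise d.keys (fun y => y)
  set candidates := years.filter (fun y => decide (y ≤ tax_year)) with hcand
  have hcpw : candidates.Pairwise (· ≤ ·) := hypw.filter _
  unfold year_param_py year_param_py_alt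
  simp only [hprod, if_neg hne, ← hd, ← hyears, ← hcand]
  cases hblv : params.foldl (pvStepBL tax_year) none with
  | some p =>
    rw [hblv] at hbl
    obtain ⟨hple, hpget, hpmax⟩ := hbl
    have hpkey : p.1 ∈ params.map (·.1) := pvGetMkSome_mem params p.1 p.2 hpget
    have hdget : d.getD p.1 0 = p.2 := by
      rw [PySem.Dict.getD_eq_get?_getD, hd, hpget]; rfl
    by_cases hct : d.contains tax_year
    · -- tax_year is a key, so B's running maximum is exactly tax_year
      have hty : tax_year ∈ params.map (·.1) := by
        have := PySem.Dict.contains_eq_decide_mem_keys d tax_year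
        rw [hct, hkeys] at this
        exact of_decide_eq_true this.symm
      obtain ⟨q, hq, hq1⟩ := List.mem_map.1 hty
      have h1 : tax_year ≤ p.1 := hq1 ▸ hpmax q hq (le_of_eq hq1)
      have hpty : p.1 = tax_year := le_antisymm hple h1
      simp only [hct, if_true]
      rw [← hpty, hdget]
    · simp only [hct, Bool.false_eq_true, if_false]
      -- candidates cannot be empty: p.1 is a key ≤ tax_year
      cases hlast : candidates.getLast? with
      | none =>
        exfalso
        have hcnil : candidates = [] := List.getLast?_eq_none_iff.1 hlast
        have : p.1 ∈ years := (hyperm.mem_iff).2 (hkeys ▸ hpkey)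
        have : p.1 ∈ candidates := List.mem_filter.2 ⟨this, by simpa using hple⟩
        rw [hcnil] at this
        exact absurd this (List.not_mem_nil)
      | some c =>
        have hcmem : c ∈ candidates := List.mem_of_getLast? hlast
        have hcle : c ≤ tax_year := by
          have := (List.mem_filter.1 hcmem).2
          simpa using this
        have hckey : c ∈ params.map (·.1) := by
          have h' := (hyperm.mem_iff).1 (List.mem_of_mem_filter hcmem)
          rwa [hkeys] at h'
        obtain ⟨q, hq, hq1⟩ := List.mem_map.1 hckey
        have h1 : c ≤ p.1 := hq1 ▸ hpmax q hq (hq1 ▸ hcle)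
        have h2 : p.1 ≤ c := by
          have hpy : p.1 ∈ years := (hyperm.mem_iff).2 (hkeys ▸ hpkey)
          have hpc : p.1 ∈ candidates := List.mem_filter.2 ⟨hpy, by simpa using hple⟩
          exact pvPairwiseGetLast candidates c hcpw hlast p.1 hpc
        rw [le_antisymm h1 h2]
        show d.getD p.1 0 = p.2
        exact hdget
  | none =>
    -- no key ≤ tax_year: A cannot hit the contains or candidates branch
    rw [hblv] at hbl
    have hnokey : ∀ q ∈ params, ¬ q.1 ≤ tax_year := hbl
    have hct : d.contains tax_year = false := by
      rw [PySem.Dict.contains_eq_decide_mem_keys d tax_year, hkeys]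
      simp only [decide_eq_false_iff_not]
      intro hmem
      obtain ⟨q, hq, hq1⟩ := List.mem_map.1 hmem
      exact hnokey q hq (le_of_eq hq1)
    have hcnil : candidates = [] := by
      rw [hcand, List.filter_eq_nil_iff]
      intro y hy
      have hmem : y ∈ params.map (·.1) := hkeys ▸ (hyperm.mem_iff).1 hy
      obtain ⟨q, hq, hq1⟩ := List.mem_map.1 hmem
      have := hnokey q hq
      simp only [decide_eq_true_eq]
      omega
    simp only [hct, Bool.false_eq_true, if_false, hcnil, List.getLast?_nil]
    -- fallback: years.head? is the minimal key; B's running minimum holds its first match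
    cases hgmv : params.foldl pvStepGM none with
    | none => rw [hgmv] at hgm; exact absurd hgm hpre
    | some g =>
      rw [hgmv] at hgm
      obtain ⟨hgget, hgmin⟩ := hgm
      have hgkey : g.1 ∈ params.map (·.1) := pvGetMkSome_mem params g.1 g.2 hgget
      have hgy : g.1 ∈ years := (hyperm.mem_iff).2 (hkeys ▸ hgkey)
      have hdget : d.getD g.1 0 = g.2 := by
        rw [PySem.Dict.getD_eq_get?_getD, hd, hgget]; rfl
      cases hhead : years.head? with
      | none =>
        exfalso
        have hynil : years = [] := List.head?_eq_none_iff.1 hhead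
        rw [hynil] at hgy
        exact absurd hgy (List.not_mem_nil)
      | some m =>
        have hmy : m ∈ years := List.mem_of_mem_head? hhead
        have hmkey : m ∈ params.map (·.1) := hkeys ▸ (hyperm.mem_iff).1 hmy
        obtain ⟨q, hq, hq1⟩ := List.mem_map.1 hmkey
        have h1 : g.1 ≤ m := hq1 ▸ hgmin q hq
        have h2 : m ≤ g.1 := pvPairwiseHead years m hypw hhead g.1 hgy
        rw [le_antisymm h2 h1]
        show d.getD g.1 0 = g.2
        exact hdget
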